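-- pv_equiv track=rewrite | github.com/huschamp/symbol_regress | Symbol_Regress.py | num_operation
-- ===== SOURCE A (Python) =====
-- binary_op=['+','-','*','/','^']
--
-- unar_op=['U-','ln','exp']
--
-- def num_operation(chromosoma):
--     binar=0
--     unar=0
--     num=0
--     for gen in chromosoma:
--         if gen in binary_op:
--             binar=binar+1
--         elif gen in unar_op:
--             unar=unar+1
--         else:
--             num=num+1
--     return [num,binar,unar]
-- ===== SOURCE B (Python) =====
-- binary_op=['+','-','*','/','^']
--
-- unar_op=['U-','ln','exp']
--
-- def num_operation(chromosoma):
--     # Staged passes: one list.count scan per fixed operator token; everything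
--     # that is neither binary nor unary is a number, so num = len - binar - unar.
--     binar = sum(chromosoma.count(op) for op in binary_op)
--     unar = sum(chromosoma.count(op) for op in unar_op)
--     return [len(chromosoma) - binar - unar, binar, unar]
-- ===== Notes on version B (the rewrite author's own statement) =====
-- stated objective: alternative
-- what changed: Replaced A's single pass with per-element branch tests and three running accumulators by staged whole-list scans: one list.count pass per fixed operator token summed per operator class, with num derived arithmetically as len(chromosoma) - binar - unar (correct because the two token tables are disjoint).
import Mathlib
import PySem

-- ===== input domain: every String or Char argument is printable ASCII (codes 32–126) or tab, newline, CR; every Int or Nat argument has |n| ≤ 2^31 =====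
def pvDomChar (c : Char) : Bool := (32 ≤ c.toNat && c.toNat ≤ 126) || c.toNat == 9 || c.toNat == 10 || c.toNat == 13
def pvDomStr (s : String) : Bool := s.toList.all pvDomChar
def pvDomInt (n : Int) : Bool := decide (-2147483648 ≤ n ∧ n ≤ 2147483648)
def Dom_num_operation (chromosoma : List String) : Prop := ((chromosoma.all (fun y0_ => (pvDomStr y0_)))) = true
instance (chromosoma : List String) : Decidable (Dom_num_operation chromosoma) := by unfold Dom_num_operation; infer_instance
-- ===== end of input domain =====

-- B replaces A's one-pass branch-and-increment loop by staged per-token list.count scans, deriving num arithmetically (alternative decomposition).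


-- ===== PORT A =====
def binary_op : List String := ["+", "-", "*", "/", "^"]

def unar_op : List String := ["U-", "ln", "exp"]

-- literal port of A's loop: three counters updated per element, branch order as in the Python
def num_operation (chromosoma : List String) : List Int :=
  let s := chromosoma.foldl
    (fun (acc : Int × Int × Int) gen =>
      let binar := acc.1; let unar := acc.2.1; let num := acc.2.2
      if gen ∈ binary_op then (binar + 1, unar, num)
      else if gen ∈ unar_op then (binar, unar + 1, num)
      else (binar, unar, num + 1))
    (0, 0, 0)
  [s.2.2, s.1, s.2.1]

-- ===== PORT B =====
-- port of B: one list.count scan per fixed operator token, num = len - binar - unar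
def num_operation_alt (chromosoma : List String) : List Int :=
  let binar := (binary_op.map (fun op => ((chromosoma.count op : Nat) : Int))).sum
  let unar := (unar_op.map (fun op => ((chromosoma.count op : Nat) : Int))).sum
  [(chromosoma.length : Int) - binar - unar, binar, unar]

-- ===== PRECONDITION & SPEC =====
def Spec_num_operation (chromosoma : List String) (out : List Int) : Prop := out = num_operation_alt chromosoma
instance (chromosoma : List String) (out : List Int) : Decidable (Spec_num_operation chromosoma out) := by unfold Spec_num_operation; infer_instance

-- ===== CLAIM (what is proved, stated in full; the proofs are below) =====
def Claim_equal_num_operation : Prop := ∀ (chromosoma : List String), Dom_num_operation chromosoma → Spec_num_operation chromosoma (num_operation chromosoma)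

-- ===== LEMMAS AND PROOFS =====

-- Σ_{op ∈ ops} [x = op] = [x ∈ ops] for a duplicate-free token list
theorem sum_indicator (ops : List String) (h : ops.Nodup) (x : String) :
    (ops.map (fun op => if x = op then (1 : Int) else 0)).sum = if x ∈ ops then 1 else 0 := by
  induction ops with
  | nil => simp
  | cons o os ih =>
    rcases List.nodup_cons.mp h with ⟨ho, hos⟩
    by_cases hx : x = o
    · subst hx
      simp [ho, ih hos]
    · simp [hx, ih hos]

-- Σ_{op ∈ ops} count op ch = countP (· ∈ ops) ch for a duplicate-free token list
theorem sum_count_eq_countP (ops : List String) (h : ops.Nodup) (ch : List String) :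
    (ops.map (fun op => (ch.count op : Int))).sum =
      ((ch.countP (fun g => decide (g ∈ ops)) : Nat) : Int) := by
  induction ch with
  | nil => simp
  | cons x xs ih =>
    have hcnt : ∀ op : String, ((x :: xs).count op : Int)
        = (xs.count op : Int) + (if x = op then 1 else 0) := by
      intro op
      by_cases hx : x = op <;> simp [hx]
    have hmap : (ops.map (fun op => ((x :: xs).count op : Int))).sum
        = (ops.map (fun op => (xs.count op : Int))).sum
          + (ops.map (fun op => if x = op then (1 : Int) else 0)).sum := by
      have : ops.map (fun op => ((x :: xs).count op : Int))
          = ops.map (fun op => (xs.count op : Int) + (if x = op then 1 else 0)) := by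
        exact List.map_congr_left (fun op _ => hcnt op)
      rw [this, ← List.sum_map_add]
    rw [hmap, ih, sum_indicator ops h x]
    by_cases hx : x ∈ ops <;> simp [hx]

-- no token is both binary and unary
theorem disjoint_ops (g : String) (hb : g ∈ binary_op) (hu : g ∈ unar_op) : False := by
  simp [binary_op] at hb
  rcases hb with h | h | h | h | h <;> subst h <;> simp [unar_op] at hu

-- A's loop, with general accumulators
theorem foldlA (ch : List String) (b u n : Int) :
    ch.foldl
      (fun (acc : Int × Int × Int) gen =>
        let binar := acc.1; let unar := acc.2.1; let num := acc.2.2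
        if gen ∈ binary_op then (binar + 1, unar, num)
        else if gen ∈ unar_op then (binar, unar + 1, num)
        else (binar, unar, num + 1))
      (b, u, n)
    = (b + (ch.countP (fun g => decide (g ∈ binary_op)) : Int),
       u + (ch.countP (fun g => decide (g ∈ unar_op)) : Int),
       n + (ch.countP (fun g => !decide (g ∈ binary_op) && !decide (g ∈ unar_op)) : Int)) := by
  induction ch generalizing b u n with
  | nil => simp
  | cons x xs ih =>
    by_cases hb : x ∈ binary_op
    · have hu : x ∉ unar_op := fun hu => disjoint_ops x hb hu
      simp only [List.foldl_cons, if_pos hb, ih, List.countP_cons]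
      simp [hb, hu]
      omega
    · by_cases hu : x ∈ unar_op
      · simp only [List.foldl_cons, if_neg hb, if_pos hu, ih, List.countP_cons]
        simp [hb, hu]
        omega
      · simp only [List.foldl_cons, if_neg hb, if_neg hu, ih, List.countP_cons]
        simp [hb, hu]
        omega

-- countP splits over the disjoint predicates
theorem countP_split (ch : List String) :
    ch.countP (fun g => decide (g ∈ binary_op)) + ch.countP (fun g => decide (g ∈ unar_op))
      + ch.countP (fun g => !decide (g ∈ binary_op) && !decide (g ∈ unar_op)) = ch.length := by
  induction ch with
  | nil => simp
  | cons x xs ih =>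
    by_cases hb : x ∈ binary_op
    · have hu : x ∉ unar_op := fun hu => disjoint_ops x hb hu
      simp only [List.countP_cons]
      simp [hb, hu]
      omega
    · by_cases hu : x ∈ unar_op <;>
        · simp only [List.countP_cons]
          simp [hb, hu]
          omega

-- ===== VERDICT (by name: the statement is the Claim_ definition above) =====
theorem num_operation_spec : Claim_equal_num_operation := by
  intro ch _
  show num_operation ch = num_operation_alt ch
  have hB := sum_count_eq_countP binary_op (by decide) ch
  have hU := sum_count_eq_countP unar_op (by decide) ch
  have hsplit := countP_split ch
  simp only [num_operation, num_operation_alt, foldlA, hB, hU]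
  simp only [zero_add, List.cons.injEq, and_true]
  omega
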